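-- pv_equiv track=rewrite | github.com/LinglingGreat/StudyAlgorithm | code/算术表达式去括号.py | process_bracket
-- ===== SOURCE A (Python) =====
-- def process_bracket(index, ss, expre):
--     """处理从index开始的字符，ss是index之前已经处理好的字符"""
--     cur = expre[index]
--     if ss[-1] == "-":  # 处理括号前是-号的情况，由于是可能存在嵌套括号，这里选择的是ss的正负号
--         while cur != ")":  # 处理括号里面所有的字符
--             if cur == "-":
--                 ss.append("+")
--             elif cur == '+':
--                 ss.append("-")
--             elif cur == '(':   # 存在嵌套，迭代求解
--                 index = process_bracket(index+1, ss, expre)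
--             else:
--                 ss.append(cur)
--             index += 1
--             cur = expre[index]
--     else:  # 处理括号前是+号的情况
--         while cur != ")":
--             if cur == '(':   # 存在嵌套，迭代求解
--                 index = process_bracket(index+1, ss, expre)
--             else:
--                 ss.append(cur)
--             index += 1
--             cur = expre[index]
--     return index
-- ===== SOURCE B (Python) =====
-- def process_bracket(index, ss, expre):
--     """Iterative rewrite: an explicit stack of 'flip' flags replaces the recursion."""
--     stack = []
--     flip = ss[-1] == "-"
--     while True:
--         cur = expre[index]
--         if cur == "(":
--             stack.append(flip)
--             flip = ss[-1] == "-"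
--         elif cur == ")":
--             if not stack:
--                 return index
--             flip = stack.pop()
--         elif flip and cur == "-":
--             ss.append("+")
--         elif flip and cur == "+":
--             ss.append("-")
--         else:
--             ss.append(cur)
--         index += 1
-- ===== Notes on version B (the rewrite author's own statement) =====
-- stated objective: alternative
-- what changed: The recursive descent over nested brackets is replaced by a single iterative loop that maintains an explicit stack of sign-flip flags (push the current flip on '(', recompute it from ss[-1], pop on ')'), so the call stack disappears.
import Mathlib
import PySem

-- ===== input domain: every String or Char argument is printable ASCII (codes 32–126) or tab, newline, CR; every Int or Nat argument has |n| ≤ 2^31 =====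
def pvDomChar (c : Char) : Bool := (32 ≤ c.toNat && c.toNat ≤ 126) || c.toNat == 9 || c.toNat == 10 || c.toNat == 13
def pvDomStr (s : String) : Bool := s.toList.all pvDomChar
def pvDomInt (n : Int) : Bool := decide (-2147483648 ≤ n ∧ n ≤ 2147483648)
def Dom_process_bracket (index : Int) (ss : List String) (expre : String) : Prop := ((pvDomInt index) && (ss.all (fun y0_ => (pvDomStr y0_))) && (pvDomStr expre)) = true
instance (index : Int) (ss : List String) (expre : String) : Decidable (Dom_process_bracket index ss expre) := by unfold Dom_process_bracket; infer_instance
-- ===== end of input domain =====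

-- B rewrites the recursion as one iterative loop with an explicit stack of sign-flip flags
-- (objective: alternative decomposition, same O(n) cost). Both A and B mutate `ss` identically
-- (appends only); the equivalence proved here is about the RETURN value.

-- ===== PORT A ===== (literal port of the recursive Python A; fuel is an artifact, chosen large enough)
mutual
def procA (fuel : Nat) (cs : List Char) (index : Int) (ss : List String) : Option (Int × List String) :=
  match fuel with
  | 0 => none
  | f+1 =>
    match ss.getLast? with          -- ss[-1] (IndexError on [] → none)
    | none => none
    | some last => loopA f cs (last == "-") index ss

def loopA (fuel : Nat) (cs : List Char) (neg : Bool) (index : Int) (ss : List String) : Option (Int × List String) :=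
  match fuel with
  | 0 => none
  | f+1 =>
    match PySem.List.pyGet? cs index with   -- cur = expre[index]
    | none => none
    | some cur =>
      if cur = ')' then some (index, ss)    -- while cur != ")"
      else if neg then
        if cur = '-' then loopA f cs neg (index+1) (ss ++ ["+"])
        else if cur = '+' then loopA f cs neg (index+1) (ss ++ ["-"])
        else if cur = '(' then
          match procA f cs (index+1) ss with
          | none => none
          | some (j, ss') => loopA f cs neg (j+1) ss'
        else loopA f cs neg (index+1) (ss ++ [cur.toString])
      else
        if cur = '(' then
          match procA f cs (index+1) ss with
          | none => none
          | some (j, ss') => loopA f cs neg (j+1) ss'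
        else loopA f cs neg (index+1) (ss ++ [cur.toString])
end

def process_bracket (index : Int) (ss : List String) (expre : String) : Int :=
  let cs := expre.toList
  ((procA (3 * (cs.length + index.natAbs) + 10) cs index ss).map Prod.fst).getD 0

-- ===== PORT B ===== (literal port of Source B: explicit stack of flip flags, single loop)
def loopB (fuel : Nat) (cs : List Char) (index : Int) (stack : List Bool) (flip : Bool) (ss : List String) : Option (Int × List String) :=
  match fuel with
  | 0 => none
  | f+1 =>
    match PySem.List.pyGet? cs index with   -- cur = expre[index]
    | none => none
    | some cur =>
      if cur = '(' then
        match ss.getLast? with              -- flip = ss[-1] == "-"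
        | none => none
        | some last => loopB f cs (index+1) (flip :: stack) (last == "-") ss
      else if cur = ')' then
        match stack with
        | [] => some (index, ss)
        | f0 :: rest => loopB f cs (index+1) rest f0 ss
      else if flip ∧ cur = '-' then loopB f cs (index+1) stack flip (ss ++ ["+"])
      else if flip ∧ cur = '+' then loopB f cs (index+1) stack flip (ss ++ ["-"])
      else loopB f cs (index+1) stack flip (ss ++ [cur.toString])

def process_bracket_alt (index : Int) (ss : List String) (expre : String) : Int :=
  let cs := expre.toList
  match ss.getLast? with                    -- flip = ss[-1] == "-" (IndexError on [])
  | none => 0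
  | some last =>
    ((loopB (cs.length + index.natAbs + 2) cs index [] (last == "-") ss).map Prod.fst).getD 0

-- ===== PRECONDITION & SPEC =====
-- closeScan cs d = "scanning this character stream, a ')' closing at depth d is reached";
-- scanStream cs i = the characters A's scan can visit from index i under Python index
-- semantics (a negative in-range start reads to the end, then wraps once to the front).
def closeScan : List Char → Nat → Bool
  | [], _ => false
  | c :: rest, d =>
    if c = ')' then (if d = 0 then true else closeScan rest (d-1))
    else if c = '(' then closeScan rest (d+1)
    else closeScan rest d

def scanStream (cs : List Char) (i : Int) : List Char :=
  if i < -(cs.length : Int) then []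
  else if i < 0 then cs.drop ((cs.length : Int) + i).toNat ++ cs
  else cs.drop i.toNat

-- Pre_ = exactly the inputs on which the Python A returns (no IndexError): ss nonempty and a
-- matching ')' exists from index on.
def Pre_process_bracket (index : Int) (ss : List String) (expre : String) : Prop :=
  ss ≠ [] ∧ closeScan (scanStream expre.toList index) 0 = true
instance (index : Int) (ss : List String) (expre : String) : Decidable (Pre_process_bracket index ss expre) := by
  unfold Pre_process_bracket; infer_instance

def pvWitness_process_bracket : Int × List String × String := (0, ["+"], "a)")

def Spec_process_bracket (index : Int) (ss : List String) (expre : String) (out : Int) : Prop := out = process_bracket_alt index ss expre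
instance (index : Int) (ss : List String) (expre : String) (out : Int) : Decidable (Spec_process_bracket index ss expre out) := by unfold Spec_process_bracket; infer_instance

-- ===== CLAIM (what is proved, stated in full; the proofs are below) =====
def Claim_equal_process_bracket : Prop := ∀ (index : Int) (ss : List String) (expre : String), Dom_process_bracket index ss expre → Pre_process_bracket index ss expre → Spec_process_bracket index ss expre (process_bracket index ss expre)

-- ===== LEMMAS AND PROOFS =====

theorem pyGet?_some_bounds {α : Type} {cs : List α} {i : Int} {c : α}
    (h : PySem.List.pyGet? cs i = some c) : -(cs.length : Int) ≤ i ∧ i < (cs.length : Int) := by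
  by_cases hr : PySem.Raise.InRange cs.length i
  · simpa [PySem.Raise.InRange] using hr
  · rw [(PySem.List.pyGet?_eq_none_iff _ _).mpr hr] at h; cases h

-- loopB's result does not depend on the fuel once the fuel exceeds the remaining scan length
theorem loopB_irrel (cs : List Char) :
    ∀ (f1 f2 : Nat) (i : Int) (stack : List Bool) (flip : Bool) (ss : List String),
      ((cs.length : Int) - i).toNat < f1 → ((cs.length : Int) - i).toNat < f2 →
      loopB f1 cs i stack flip ss = loopB f2 cs i stack flip ss := by
  intro f1
  induction f1 with
  | zero => intro f2 i _ _ _ h1 _; omega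
  | succ f ih =>
    intro f2 i stack flip ss h1 h2
    cases f2 with
    | zero => omega
    | succ g =>
      simp only [loopB]
      cases hcur : PySem.List.pyGet? cs i with
      | none => rfl
      | some cur =>
        have hb := pyGet?_some_bounds hcur
        have hrec : ((cs.length : Int) - (i+1)).toNat < f ∧ ((cs.length : Int) - (i+1)).toNat < g := by omega
        repeat' split
        all_goals try rfl
        all_goals exact ih g _ _ _ _ (by omega) (by omega)

-- if loopA returns, the returned index is ≥ the start index and < the string length
theorem loopA_le (cs : List Char) :
    ∀ (f : Nat) (neg : Bool) (i : Int) (ss : List String) (j : Int) (ss₂ : List String),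
      loopA f cs neg i ss = some (j, ss₂) → i ≤ j ∧ j < (cs.length : Int) := by
  intro f
  induction f using Nat.strong_induction_on with
  | _ f ih =>
    intro neg i ss j ss₂ h
    cases f with
    | zero => simp [loopA] at h
    | succ g =>
      simp only [loopA] at h
      cases hcur : PySem.List.pyGet? cs i with
      | none => rw [hcur] at h; cases h
      | some cur =>
        rw [hcur] at h
        have hb := pyGet?_some_bounds hcur
        by_cases hp : cur = ')'
        · simp [hp] at h; omega
        · simp only [hp, if_false] at h
          -- both branches of `neg` have the same three shapes
          have step : ∀ ss', loopA g cs neg (i+1) ss' = some (j, ss₂) → i ≤ j ∧ j < (cs.length : Int) := by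
            intro ss' h'
            have := ih g (by omega) neg (i+1) ss' j ss₂ h'
            omega
          have paren : (match procA g cs (i+1) ss with
              | none => none
              | some (j', ss') => loopA g cs neg (j'+1) ss') = some (j, ss₂) →
              i ≤ j ∧ j < (cs.length : Int) := by
            intro h'
            cases hpa : procA g cs (i+1) ss with
            | none => rw [hpa] at h'; cases h'
            | some r =>
              obtain ⟨j', ss'⟩ := r
              rw [hpa] at h'
              cases g with
              | zero => simp [procA] at hpa
              | succ k =>
                simp only [procA] at hpa
                cases hgl : ss.getLast? with
                | none => rw [hgl] at hpa; cases hpa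
                | some last =>
                  rw [hgl] at hpa
                  have h1 := ih k (by omega) (last == "-") (i+1) ss j' ss' hpa
                  have h2 := ih (k+1) (by omega) neg (j'+1) ss' j ss₂ h'
                  omega
          cases hneg : neg with
          | true =>
            simp only [hneg, if_true] at h
            by_cases hm : cur = '-'
            · simp only [hm, if_true] at h; exact step _ (by simpa [hneg] using h)
            · simp only [hm, if_false] at h
              by_cases hpl : cur = '+'
              · simp only [hpl, if_true] at h; exact step _ (by simpa [hneg] using h)
              · simp only [hpl, if_false] at h
                by_cases ho : cur = '('
                · simp only [ho, if_true] at h; exact paren (by simpa [hneg] using h)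
                · simp only [ho, if_false] at h; exact step _ (by simpa [hneg] using h)
          | false =>
            simp only [hneg, Bool.false_eq_true, if_false] at h
            by_cases ho : cur = '('
            · simp only [ho, if_true] at h; exact paren (by simpa [hneg] using h)
            · simp only [ho, if_false] at h; exact step _ (by simpa [hneg] using h)

-- main simulation: B's loop with an explicit stack computes A's recursion composed with its continuation
-- the continuation of B's loop after A's inner loop has delivered (j, ss₂): pop the stack or stop
def contB (fB : Nat) (cs : List Char) (stack : List Bool) : Option (Int × List String) → Option (Int × List String)
  | none => none
  | some (j, ss₂) =>
    match stack with
    | [] => some (j, ss₂)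
    | f0 :: rest => loopB fB cs (j+1) rest f0 ss₂

theorem contB_nil (fB : Nat) (cs : List Char) (o : Option (Int × List String)) :
    contB fB cs [] o = o := by
  cases o with
  | none => rfl
  | some r => obtain ⟨j, ss₂⟩ := r; rfl

-- main simulation: B's loop with an explicit stack computes A's recursion composed with its continuation
theorem loopAB (cs : List Char) :
    ∀ (fA : Nat) (i : Int) (flip : Bool) (ss : List String) (stack : List Bool) (fB : Nat),
      3 * ((cs.length : Int) - i).toNat + 3 < fA →
      ((cs.length : Int) - i).toNat < fB →
      loopB fB cs i stack flip ss = contB fB cs stack (loopA fA cs flip i ss) := by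
  intro fA
  induction fA using Nat.strong_induction_on with
  | _ fA ih =>
    intro i flip ss stack fB hA hB
    obtain ⟨fa, rfl⟩ : ∃ fa, fA = fa + 1 := ⟨fA - 1, by omega⟩
    obtain ⟨fb, rfl⟩ : ∃ fb, fB = fb + 1 := ⟨fB - 1, by omega⟩
    cases hcur : PySem.List.pyGet? cs i with
    | none => simp [loopB, loopA, hcur, contB]
    | some cur =>
      have hbnd := pyGet?_some_bounds hcur
      have hstep : ((cs.length : Int) - (i+1)).toNat < fb ∧ ((cs.length : Int) - (i+1)).toNat < fb + 1 := by omega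
      by_cases hp : cur = ')'
      · subst hp
        have h1 : ¬ ((')' : Char) = '(') := by decide
        have e1 : loopA (fa+1) cs flip i ss = some (i, ss) := by simp [loopA, hcur]
        rw [e1]
        cases stack with
        | nil => simp [loopB, hcur, h1, contB]
        | cons f0 rest =>
          have e2 : loopB (fb+1) cs i (f0 :: rest) flip ss = loopB fb cs (i+1) rest f0 ss := by
            simp [loopB, hcur, h1]
          rw [e2, loopB_irrel cs fb (fb+1) (i+1) rest f0 ss hstep.1 hstep.2]
          rfl
      · by_cases ho : cur = '('
        · subst ho
          obtain ⟨g, rfl⟩ : ∃ g, fa = g + 1 := ⟨fa - 1, by omega⟩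
          have h1 : ¬ (('(' : Char) = ')') := by decide
          have h2 : ¬ (('(' : Char) = '-') := by decide
          have h3 : ¬ (('(' : Char) = '+') := by decide
          cases hgl : ss.getLast? with
          | none =>
            have e1 : loopA (g+1+1) cs flip i ss = none := by
              cases flip <;> simp [loopA, procA, hcur, hgl, h1, h2, h3]
            have e2 : loopB (fb+1) cs i stack flip ss = none := by
              simp [loopB, hcur, hgl]
            rw [e1, e2]; rfl
          | some last =>
            have e1 : loopA (g+1+1) cs flip i ss =
                (match loopA g cs (last == "-") (i+1) ss with
                 | none => none
                 | some (j', ss') => loopA (g+1) cs flip (j'+1) ss') := by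
              cases flip <;> simp [loopA, procA, hcur, hgl, h1, h2, h3]
            have e2 : loopB (fb+1) cs i stack flip ss =
                loopB fb cs (i+1) (flip :: stack) (last == "-") ss := by
              simp [loopB, hcur, hgl]
            rw [e1, e2, loopB_irrel cs fb (fb+1) (i+1) _ _ _ hstep.1 hstep.2,
              ih g (by omega) (i+1) (last == "-") ss (flip :: stack) (fb+1) (by omega) (by omega)]
            cases hinner : loopA g cs (last == "-") (i+1) ss with
            | none => rfl
            | some r =>
              obtain ⟨j', ss'⟩ := r
              have hjb := loopA_le cs g _ _ _ _ _ hinner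
              have e3 : contB (fb+1) cs (flip :: stack) (some (j', ss')) =
                  loopB (fb+1) cs (j'+1) stack flip ss' := rfl
              rw [e3, ih (g+1) (by omega) (j'+1) flip ss' stack (fb+1) (by omega) (by omega)]
        · -- plain character: both sides append it (sign-flipped when flip is set) and advance
          have key : ∀ e, (if flip then (if cur = '-' then e = "+" else if cur = '+' then e = "-" else e = cur.toString)
              else e = cur.toString) →
              loopB (fb+1) cs i stack flip ss = loopB fb cs (i+1) stack flip (ss ++ [e]) ∧
              loopA (fa+1) cs flip i ss = loopA fa cs flip (i+1) (ss ++ [e]) := by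
            intro e he
            cases flip with
            | false =>
              have he' : e = cur.toString := by simpa using he
              subst he'
              exact ⟨by simp [loopB, hcur, hp, ho], by simp [loopA, hcur, hp, ho]⟩
            | true =>
              by_cases hm : cur = '-'
              · have he' : e = "+" := by simpa [hm] using he
                subst he' hm
                exact ⟨by simp [loopB, hcur, hp, ho], by simp [loopA, hcur, hp, ho]⟩
              · by_cases hpl : cur = '+'
                · have he' : e = "-" := by simpa [hm, hpl] using he
                  subst he' hpl
                  exact ⟨by simp [loopB, hcur, hp, ho, hm], by simp [loopA, hcur, hp, ho, hm]⟩
                · have he' : e = cur.toString := by simpa [hm, hpl] using he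
                  subst he'
                  exact ⟨by simp [loopB, hcur, hp, ho, hm, hpl], by simp [loopA, hcur, hp, ho, hm, hpl]⟩
          have he : ∃ e, (if flip then (if cur = '-' then e = "+" else if cur = '+' then e = "-" else e = cur.toString)
              else e = cur.toString) := by
            cases flip
            · exact ⟨cur.toString, by simp⟩
            · by_cases hm : cur = '-'
              · exact ⟨"+", by simp [hm]⟩
              · by_cases hpl : cur = '+'
                · exact ⟨"-", by simp [hm, hpl]⟩
                · exact ⟨cur.toString, by simp [hm, hpl]⟩
          obtain ⟨e, heq⟩ := he
          obtain ⟨eB, eA⟩ := key e heq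
          rw [eB, eA, loopB_irrel cs fb (fb+1) (i+1) _ _ _ hstep.1 hstep.2,
            ih fa (by omega) (i+1) flip (ss ++ [e]) stack (fb+1) (by omega) (by omega)]

-- ===== VERDICT (by name: the statement is the Claim_ definition above) =====
theorem process_bracket_spec : Claim_equal_process_bracket := by
  intro index ss expre _ _
  unfold Spec_process_bracket
  show process_bracket index ss expre = process_bracket_alt index ss expre
  simp only [process_bracket, process_bracket_alt]
  obtain ⟨k, hk⟩ : ∃ k, 3 * (expre.toList.length + index.natAbs) + 10 = k + 1 :=
    ⟨3 * (expre.toList.length + index.natAbs) + 9, by omega⟩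
  cases hgl : ss.getLast? with
  | none => rw [hk]; simp [procA, hgl]
  | some last =>
    have hAB := loopAB expre.toList k index (last == "-") ss []
      (expre.toList.length + index.natAbs + 2) (by omega) (by omega)
    rw [hk]
    simp only [procA, hgl]
    rw [hAB, contB_nil]
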